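-- pv_equiv track=rewrite | github.com/Pboerwinkle/graphIsomorphismTool | graphMaker.py | compressGraph
-- ===== SOURCE A (Python) =====
-- def compressGraph(graph):### Compress graph, ex: [[2,3], [3,3], [3,4]] -> [[0,1], [1,1], [1,2]]
--     checkVars = []
--     newEdges = []
--     for edge in range(len(graph)):
--         newEdge = []
--         for element in range(len(graph[edge])):
--             foundVar = False
--             for var in range(len(checkVars)):
--                 if graph[edge][element] == checkVars[var]:
--                     newEdge.append(var)
--                     foundVar = True
--                     break
--             if not foundVar:
--                 newEdge.append(len(checkVars))
--                 checkVars.append(graph[edge][element])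
--         newEdges.append(newEdge)
--     return newEdges, len(checkVars)
-- ===== SOURCE B (Python) =====
-- def compressGraph(graph):
--     # Closed form instead of stateful id assignment: the label of a value is
--     # the number of distinct values appearing strictly before its first
--     # occurrence in the flattened graph.
--     flat = [x for edge in graph for x in edge]
--     def label(x):
--         return len(set(flat[:flat.index(x)]))
--     return [[label(x) for x in edge] for edge in graph], len(set(flat))
-- ===== Notes on version B (the rewrite author's own statement) =====
-- stated objective: alternative
-- what changed: Replaces A's stateful sequential id assignment (a growing checkVars table scanned per element) by a stateless closed-form characterization: each value's label is computed independently as the number of distinct values before its first occurrence in the flattened graph, and the total as len(set(flat)).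
import Mathlib
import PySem

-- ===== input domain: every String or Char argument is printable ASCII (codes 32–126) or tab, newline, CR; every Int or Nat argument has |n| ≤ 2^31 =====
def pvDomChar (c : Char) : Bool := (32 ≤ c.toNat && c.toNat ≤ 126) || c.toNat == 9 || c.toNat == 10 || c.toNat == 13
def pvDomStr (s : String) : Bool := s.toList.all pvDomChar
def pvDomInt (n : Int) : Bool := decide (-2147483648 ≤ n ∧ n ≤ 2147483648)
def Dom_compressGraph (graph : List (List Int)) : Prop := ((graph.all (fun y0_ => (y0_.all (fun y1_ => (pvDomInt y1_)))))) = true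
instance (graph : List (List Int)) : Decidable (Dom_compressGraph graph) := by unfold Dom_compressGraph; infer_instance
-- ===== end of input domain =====

-- B drops A's stateful growing id table: each label is a stateless closed form,
-- the number of distinct values before the value's first occurrence in the flattened graph.

-- ===== PORT A =====
-- inner 'for var in range(len(checkVars)): if x == checkVars[var]: ... break' loop:
-- first index of x in checkVars, none if the loop ends with foundVar = False
def aScan (x : Int) : List Int → Option Nat
  | [] => none
  | c :: rest => if x = c then some 0 else (aScan x rest).map (· + 1)

-- one step of the 'for element in …' loop; state p = (checkVars, newEdge)
def aStep (p : List Int × List Int) (x : Int) : List Int × List Int :=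
  match aScan x p.1 with
  | some v => (p.1, p.2 ++ [(v : Int)])
  | none => (p.1 ++ [x], p.2 ++ [(p.1.length : Int)])

def compressGraph (graph : List (List Int)) : List (List Int) × Int :=
  let st := graph.foldl
    (fun (st : List Int × List (List Int)) edge =>
      ((edge.foldl aStep (st.1, ([] : List Int))).1,
       st.2 ++ [(edge.foldl aStep (st.1, ([] : List Int))).2]))
    (([] : List Int), ([] : List (List Int)))
  (st.2, (st.1.length : Int))

-- ===== PORT B =====
def compressGraph_alt (graph : List (List Int)) : List (List Int) × Int :=
  let flat := graph.flatMap (fun edge => edge)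
  -- label(x) = len(set(flat[:flat.index(x)])); every x labelled comes from graph,
  -- so it is a member of flat and flat.index(x) cannot raise (index? is some; getD 0 exact)
  let label := fun (x : Int) =>
    ((PySem.Set.ofList
        (PySem.List.slice flat none (some (((PySem.List.index? flat x).getD 0 : Nat) : Int)))).length : Int)
  (graph.map (fun edge => edge.map label), ((PySem.Set.ofList flat).length : Int))

-- ===== PRECONDITION & SPEC =====
def Spec_compressGraph (graph : List (List Int)) (out : List (List Int) × Int) : Prop := out = compressGraph_alt graph
instance (graph : List (List Int)) (out : List (List Int) × Int) : Decidable (Spec_compressGraph graph out) := by unfold Spec_compressGraph; infer_instance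

-- ===== CLAIM (what is proved, stated in full; the proofs are below) =====
def Claim_equal_compressGraph : Prop := ∀ (graph : List (List Int)), Dom_compressGraph graph → Spec_compressGraph graph (compressGraph graph)

-- ===== LEMMAS AND PROOFS =====

-- checkVars after seeing one element / one edge / the whole graph
def varsStep (cs : List Int) (x : Int) : List Int :=
  match aScan x cs with
  | some _ => cs
  | none => cs ++ [x]

def varsEdge (cs : List Int) (edge : List Int) : List Int := edge.foldl varsStep cs

def varsAll (cs : List Int) (graph : List (List Int)) : List Int := graph.foldl varsEdge cs

-- the label A writes for x against table V
def relx (V : List Int) (x : Int) : Int :=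
  match aScan x V with
  | some v => (v : Int)
  | none => 0

theorem aScan_eq_none {x : Int} {cs : List Int} : aScan x cs = none ↔ x ∉ cs := by
  induction cs with
  | nil => simp [aScan]
  | cons c cs ih =>
    by_cases h : x = c <;> simp [aScan, h, ih]

theorem aScan_append_of_mem {x : Int} {cs : List Int} (t : List Int) (h : x ∈ cs) :
    aScan x (cs ++ t) = aScan x cs := by
  induction cs with
  | nil => simp at h
  | cons c cs ih =>
    by_cases hx : x = c
    · simp [aScan, hx]
    · have : x ∈ cs := by simpa [hx] using h
      simp [aScan, hx, ih this]

theorem aScan_prefix_of_mem {x : Int} {cs cs' : List Int} (hp : cs <+: cs') (h : x ∈ cs) :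
    aScan x cs' = aScan x cs := by
  obtain ⟨t, rfl⟩ := hp
  exact aScan_append_of_mem t h

theorem aScan_append_self {x : Int} {cs : List Int} (h : x ∉ cs) :
    aScan x (cs ++ [x]) = some cs.length := by
  induction cs with
  | nil => simp [aScan]
  | cons c cs ih =>
    have hx : x ≠ c := by rintro rfl; simp at h
    have : x ∉ cs := fun hm => h (List.mem_cons_of_mem _ hm)
    simp [aScan, hx, ih this]

theorem varsStep_prefix (cs : List Int) (x : Int) : cs <+: varsStep cs x := by
  unfold varsStep
  cases aScan x cs <;> simp

theorem varsEdge_prefix (edge : List Int) (cs : List Int) : cs <+: varsEdge cs edge := by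
  induction edge generalizing cs with
  | nil => simp [varsEdge]
  | cons x xs ih =>
    exact (varsStep_prefix cs x).trans (by simpa [varsEdge] using ih (varsStep cs x))

theorem varsAll_prefix (graph : List (List Int)) (cs : List Int) : cs <+: varsAll cs graph := by
  induction graph generalizing cs with
  | nil => simp [varsAll]
  | cons e es ih =>
    exact (varsEdge_prefix e cs).trans (by simpa [varsAll] using ih (varsEdge cs e))

-- one edge of A's loop, with the labels read off any table extending the edge's final checkVars
theorem edge_fold_eq (edge : List Int) :
    ∀ (cs ne : List Int) (V : List Int), varsEdge cs edge <+: V →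
    edge.foldl aStep (cs, ne) = (varsEdge cs edge, ne ++ edge.map (relx V)) := by
  induction edge with
  | nil => intro cs ne V _; simp [varsEdge]
  | cons x xs ih =>
    intro cs ne V hV
    have hV' : varsEdge (varsStep cs x) xs <+: V := by
      simpa [varsEdge] using hV
    cases h : aScan x cs with
    | some v =>
      have hmem : x ∈ cs := by
        by_contra hm
        rw [aScan_eq_none.mpr hm] at h; cases h
      have hstep : varsStep cs x = cs := by simp [varsStep, h]
      rw [hstep] at hV'
      have hcsV : cs <+: V := (varsEdge_prefix xs _).trans hV'
      have hrel : relx V x = (v : Int) := by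
        unfold relx
        rw [aScan_prefix_of_mem hcsV hmem, h]
      have hone : aStep (cs, ne) x = (cs, ne ++ [(v : Int)]) := by simp [aStep, h]
      rw [List.foldl_cons, hone, ih cs (ne ++ [(v : Int)]) V hV']
      simp [varsEdge, hstep, hrel]
    | none =>
      have hmem : x ∉ cs := aScan_eq_none.mp h
      have hstep : varsStep cs x = cs ++ [x] := by simp [varsStep, h]
      rw [hstep] at hV'
      have hcsV : cs ++ [x] <+: V := (varsEdge_prefix xs _).trans hV'
      have hrel : relx V x = (cs.length : Int) := by
        unfold relx
        rw [aScan_prefix_of_mem hcsV (by simp), aScan_append_self hmem]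
      have hone : aStep (cs, ne) x = (cs ++ [x], ne ++ [(cs.length : Int)]) := by
        simp [aStep, h]
      rw [List.foldl_cons, hone, ih (cs ++ [x]) (ne ++ [(cs.length : Int)]) V hV']
      simp [varsEdge, hstep, hrel]

-- A's outer loop
theorem outer_fold_eq (graph : List (List Int)) :
    ∀ (cs : List Int) (acc : List (List Int)) (V : List Int), varsAll cs graph <+: V →
    graph.foldl
      (fun (st : List Int × List (List Int)) edge =>
        ((edge.foldl aStep (st.1, ([] : List Int))).1,
         st.2 ++ [(edge.foldl aStep (st.1, ([] : List Int))).2]))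
      (cs, acc)
      = (varsAll cs graph, acc ++ graph.map (fun e => e.map (relx V))) := by
  induction graph with
  | nil => intro cs acc V _; simp [varsAll]
  | cons e es ih =>
    intro cs acc V hV
    have hV' : varsAll (varsEdge cs e) es <+: V := by simpa [varsAll] using hV
    have he : varsEdge cs e <+: V := (varsAll_prefix es _).trans hV'
    rw [List.foldl_cons]
    simp only [edge_fold_eq e cs ([] : List Int) V he, List.nil_append]
    rw [ih (varsEdge cs e) (acc ++ [e.map (relx V)]) V hV']
    simp [varsAll]

-- varsStep is exactly PySem.Set.add on Int lists
theorem varsStep_eq_add (cs : List Int) (x : Int) : varsStep cs x = PySem.Set.add cs x := by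
  unfold varsStep PySem.Set.add
  cases h : aScan x cs with
  | some v =>
    have hmem : x ∈ cs := by
      by_contra hm; rw [aScan_eq_none.mpr hm] at h; cases h
    simp [PySem.Set.contains, hmem]
  | none =>
    have hmem : x ∉ cs := aScan_eq_none.mp h
    simp [PySem.Set.contains, hmem]

theorem foldl_varsStep_eq_ofList_aux (P : List Int) : ∀ cs,
    P.foldl varsStep cs = P.foldl PySem.Set.add cs := by
  induction P with
  | nil => intro cs; simp
  | cons x xs ih => intro cs; simp [varsStep_eq_add, ih]

theorem ofList_eq_foldl_varsStep (P : List Int) :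
    PySem.Set.ofList P = P.foldl varsStep [] := by
  rw [PySem.Set.ofList_eq_foldl, foldl_varsStep_eq_ofList_aux]

-- A's final table over the whole graph is the fold of varsStep over the flattened graph
theorem varsAll_eq_flat (graph : List (List Int)) : ∀ cs,
    varsAll cs graph = (graph.flatMap (fun e => e)).foldl varsStep cs := by
  induction graph with
  | nil => intro cs; simp [varsAll]
  | cons e es ih =>
    intro cs
    simp only [varsAll] at *
    rw [show (e :: es).foldl varsEdge cs = es.foldl varsEdge (varsEdge cs e) from rfl, ih]
    simp [List.flatMap_cons, List.foldl_append, varsEdge]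

theorem foldl_varsStep_prefix (P : List Int) (cs : List Int) :
    cs <+: P.foldl varsStep cs := by
  induction P generalizing cs with
  | nil => simp
  | cons x xs ih =>
    exact (varsStep_prefix cs x).trans (by simpa using ih (varsStep cs x))

theorem not_mem_foldl_varsStep {x : Int} (P : List Int) (cs : List Int)
    (hP : x ∉ P) (hcs : x ∉ cs) : x ∉ P.foldl varsStep cs := by
  induction P generalizing cs with
  | nil => simpa
  | cons y ys ih =>
    have hy : x ∉ ys := fun hm => hP (List.mem_cons_of_mem _ hm)
    have hxy : x ≠ y := fun e => hP (e ▸ List.mem_cons_self)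
    refine ih _ hy ?_
    unfold varsStep
    cases aScan y cs <;> simp [hcs, hxy]

-- the key closed form: for x ∈ flat, A's label against the full table equals
-- the number of distinct values before x's first occurrence in flat
theorem relx_closed_form (flat : List Int) (x : Int) (hx : x ∈ flat) :
    relx (flat.foldl varsStep []) x
      = ((PySem.Set.ofList (flat.take ((PySem.List.index? flat x).getD 0))).length : Int) := by
  obtain ⟨i, hi⟩ := (PySem.List.index?_isSome_iff (xs := flat) (v := x)).mpr hx |> Option.isSome_iff_exists.mp
  obtain ⟨pre, suf, hsplit, hlen, hpre⟩ := ((PySem.List.index?_eq_some_iff flat x i)).mp hi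
  have htake : flat.take i = pre := by
    subst hsplit; rw [← hlen]; simp
  have hF : flat.foldl varsStep [] = suf.foldl varsStep (pre.foldl varsStep [] ++ [x]) := by
    subst hsplit
    rw [List.foldl_append, List.foldl_cons]
    congr 1
    have hnone : aScan x (pre.foldl varsStep []) = none :=
      aScan_eq_none.mpr (not_mem_foldl_varsStep pre [] hpre (by simp))
    show varsStep (pre.foldl varsStep []) x = _
    rw [varsStep, hnone]
  have hxmem : x ∉ pre.foldl varsStep [] := not_mem_foldl_varsStep pre [] hpre (by simp)
  have hpref : pre.foldl varsStep [] ++ [x] <+: flat.foldl varsStep [] := by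
    rw [hF]; exact foldl_varsStep_prefix _ _
  unfold relx
  rw [aScan_prefix_of_mem hpref (by simp), aScan_append_self hxmem,
      hi, Option.getD_some, htake, ofList_eq_foldl_varsStep]

-- ===== VERDICT (by name: the statement is the Claim_ definition above) =====
theorem compressGraph_spec : Claim_equal_compressGraph := by
  intro graph _
  show compressGraph graph = compressGraph_alt graph
  have hA : compressGraph graph
      = (([] : List (List Int)) ++ graph.map (fun e => e.map (relx (varsAll [] graph))),
         ((varsAll [] graph).length : Int)) := by
    unfold compressGraph
    rw [outer_fold_eq graph [] [] (varsAll [] graph) List.prefix_rfl]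
  rw [hA]
  unfold compressGraph_alt
  simp only [List.nil_append, Prod.mk.injEq]
  rw [varsAll_eq_flat graph []]
  constructor
  · apply List.map_congr_left
    intro e he
    apply List.map_congr_left
    intro x hxe
    have hx : x ∈ graph.flatMap (fun e => e) := List.mem_flatMap.mpr ⟨e, he, hxe⟩
    rw [relx_closed_form _ x hx, PySem.List.slice_to_natCast]
  · rw [ofList_eq_foldl_varsStep]
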